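-- pv_equiv track=rewrite | github.com/Vivekyadv/InterviewBit | Heaps and Maps/Heap/4. profit maximisation.py | solve
-- ===== SOURCE A (Python) =====
-- def solve(arr, B):
--     profit = 0
--     while B > 0:
--         max_ele = max(arr)
--         indx = arr.index(max_ele)
--         profit += max_ele
--
--         arr[indx] -= 1
--         B -= 1
--
--     return profit
-- ===== SOURCE B (Python) =====
-- def solve(arr, B):
--     if B <= 0:
--         return 0
--     vals = sorted(arr, reverse=True)
--     v = vals[0]
--     profit = 0
--     k = 1
--     for nv in vals[1:]:
--         if B <= (v - nv) * k:
--             break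
--         profit += k * (v + nv + 1) * (v - nv) // 2
--         B -= (v - nv) * k
--         v = nv
--         k += 1
--     q, r = divmod(B, k)
--     profit += k * (v + (v - q + 1)) * q // 2 + r * (v - q)
--     return profit
-- ===== Notes on version B (the rewrite author's own statement) =====
-- stated objective: faster
-- what changed: A repeats B rounds of 'find max, decrement it' over the whole list; B sorts once in descending order and sums whole levels in closed form (arithmetic-series blocks plus one divmod for the last partial level), so the profit is computed without simulating the B picks.
-- outside the precondition, e.g. on solve([], 3): A raises ValueError, B raises IndexError
import Mathlib
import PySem

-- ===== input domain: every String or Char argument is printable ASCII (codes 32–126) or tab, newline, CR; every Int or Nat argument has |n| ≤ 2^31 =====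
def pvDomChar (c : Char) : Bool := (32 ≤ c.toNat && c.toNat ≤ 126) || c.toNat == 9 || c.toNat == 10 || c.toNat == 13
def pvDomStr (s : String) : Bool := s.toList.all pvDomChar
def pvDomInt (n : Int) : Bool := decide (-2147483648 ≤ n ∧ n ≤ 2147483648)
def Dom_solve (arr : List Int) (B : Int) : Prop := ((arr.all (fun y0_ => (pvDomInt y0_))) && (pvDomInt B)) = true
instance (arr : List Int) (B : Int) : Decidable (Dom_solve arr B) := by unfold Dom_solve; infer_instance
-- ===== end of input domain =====

-- B replaces A's B-round "pick max, decrement it" loop by one descending sort plus level-based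
-- block summation; equivalence is about the RETURN value only: A decrements elements of arr in
-- place (caller-observable), B does not mutate arr.

-- ===== PORT A =====
-- the while loop: fuel = number of remaining picks (B is decremented by 1 each turn)
def solveLoopA : List Int → Int → Nat → Int
  | _, profit, 0 => profit
  | arr, profit, Nat.succ n =>
    match PySem.List.max? arr (fun x => x) with
    | none => profit            -- max([]) raises ValueError in Python: outside Pre_solve
    | some m =>
      match PySem.List.index? arr m with
      | none => profit          -- unreachable: m ∈ arr
      | some i => solveLoopA (arr.set i (m - 1)) (profit + m) n

def solve (arr : List Int) (B : Int) : Int := solveLoopA arr 0 B.toNat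

-- ===== PORT B =====
-- final block: q, r = divmod(B, k); profit += k * (v + (v - q + 1)) * q // 2 + r * (v - q)
-- (k ≥ 1 whenever this runs, so divmod never raises; divmod(B, k) = (B // k, B % k))
def altFinish (k v B profit : Int) : Int :=
  let q := PySem.Int.floordiv B k
  let r := PySem.Int.mod B k
  profit + PySem.Int.floordiv (k * (v + (v - q + 1)) * q) 2 + r * (v - q)

-- the 'for nv in vals[1:]' loop with its break
def altLoop : List Int → Int → Int → Int → Int → Int
  | [], k, v, B, profit => altFinish k v B profit
  | nv :: t, k, v, B, profit =>
    if B ≤ (v - nv) * k then altFinish k v B profit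
    else altLoop t (k + 1) nv (B - (v - nv) * k)
           (profit + PySem.Int.floordiv (k * (v + nv + 1) * (v - nv)) 2)

def solve_alt (arr : List Int) (B : Int) : Int :=
  if B ≤ 0 then 0
  else
    match PySem.List.sorted arr (fun x => x) true with
    | [] => 0                   -- vals[0] raises IndexError in Python: outside Pre_solve
    | v :: rest => altLoop rest 1 v B 0

-- ===== PRECONDITION & SPEC =====
-- Pre_ excludes only the inputs where A raises: empty arr with B > 0 (max([]) is a ValueError).
def Pre_solve (arr : List Int) (B : Int) : Prop := arr ≠ [] ∨ B ≤ 0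
instance (arr : List Int) (B : Int) : Decidable (Pre_solve arr B) := by unfold Pre_solve; infer_instance
def pvWitness_solve : List Int × Int := ([3, 1, 2], 4)

def Spec_solve (arr : List Int) (B : Int) (out : Int) : Prop := out = solve_alt arr B
instance (arr : List Int) (B : Int) (out : Int) : Decidable (Spec_solve arr B out) := by unfold Spec_solve; infer_instance

-- ===== CLAIM (what is proved, stated in full; the proofs are below) =====
def Claim_equal_solve : Prop := ∀ (arr : List Int) (B : Int), Dom_solve arr B → Pre_solve arr B → Spec_solve arr B (solve arr B)

-- ===== LEMMAS AND PROOFS =====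

-- profit accumulator splits off
theorem solveLoopA_acc (n : Nat) : ∀ (l : List Int) (p : Int),
    solveLoopA l p n = p + solveLoopA l 0 n := by
  induction n with
  | zero => intro l p; simp [solveLoopA]
  | succ n ih =>
    intro l p
    simp only [solveLoopA]
    cases PySem.List.max? l (fun x => x) with
    | none => simp
    | some m =>
      simp only []
      cases PySem.List.index? l m with
      | none => simp
      | some i =>
        simp only []
        rw [ih _ (p + m), ih _ (0 + m)]; ring

-- max(arr) only depends on the multiset of arr
theorem max?_perm_eq (l1 l2 : List Int) (hp : l1.Perm l2) :
    PySem.List.max? l1 (fun x => x) = PySem.List.max? l2 (fun x => x) := by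
  cases h1 : PySem.List.max? l1 (fun x => x) with
  | none =>
    have : l1 = [] := (PySem.List.max?_eq_none_iff _ _).mp h1
    subst this
    have : l2 = [] := hp.nil_eq.symm
    subst this; rfl
  | some m1 =>
    cases h2 : PySem.List.max? l2 (fun x => x) with
    | none =>
      have : l2 = [] := (PySem.List.max?_eq_none_iff _ _).mp h2
      subst this
      have : l1 = [] := hp.symm.nil_eq.symm
      subst this; simp [PySem.List.max?] at h1
    | some m2 =>
      have hm1 : m1 ∈ l1 := PySem.List.max?_mem h1
      have hm2 : m2 ∈ l2 := PySem.List.max?_mem h2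
      have h12 : m1 ≤ m2 := PySem.List.max?_isMax h2 m1 (hp.mem_iff.mp hm1)
      have h21 : m2 ≤ m1 := PySem.List.max?_isMax h1 m2 (hp.mem_iff.mpr hm2)
      have : m1 = m2 := le_antisymm h12 h21
      rw [this]

-- A's decrement step, as a multiset operation
theorem setA_perm (l : List Int) (m : Int) (i : Nat)
    (h : PySem.List.index? l m = some i) :
    (l.set i (m - 1)).Perm ((m - 1) :: l.erase m) := by
  rw [PySem.List.index?_eq_some_iff] at h
  obtain ⟨pre, suf, rfl, rfl, hnm⟩ := h
  have hset : (pre ++ m :: suf).set pre.length (m - 1) = pre ++ (m - 1) :: suf := by simp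
  rw [hset, List.erase_append_right _ hnm, List.erase_cons_head]
  exact List.perm_middle

-- the value returned by A's loop depends only on the multiset of arr
theorem solveLoopA_perm (n : Nat) : ∀ (l1 l2 : List Int), l1.Perm l2 →
    solveLoopA l1 0 n = solveLoopA l2 0 n := by
  induction n with
  | zero => intro l1 l2 _; simp [solveLoopA]
  | succ n ih =>
    intro l1 l2 hp
    cases h1 : PySem.List.max? l1 (fun x => x) with
    | none =>
      have h2 : PySem.List.max? l2 (fun x => x) = none := (max?_perm_eq l1 l2 hp) ▸ h1
      simp [solveLoopA, h1, h2]
    | some m =>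
      have h2 : PySem.List.max? l2 (fun x => x) = some m := (max?_perm_eq l1 l2 hp) ▸ h1
      have hm1 : m ∈ l1 := PySem.List.max?_mem h1
      have hm2 : m ∈ l2 := hp.mem_iff.mp hm1
      obtain ⟨i1, hi1⟩ := Option.isSome_iff_exists.mp ((PySem.List.index?_isSome_iff _ _).mpr hm1)
      obtain ⟨i2, hi2⟩ := Option.isSome_iff_exists.mp ((PySem.List.index?_isSome_iff _ _).mpr hm2)
      simp only [solveLoopA, h1, h2, hi1, hi2]
      rw [solveLoopA_acc n _ (0 + m), solveLoopA_acc n _ (0 + m)]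
      congr 1
      apply ih
      exact ((setA_perm l1 m i1 hi1).trans ((hp.erase m).cons (m - 1))).trans
        (setA_perm l2 m i2 hi2).symm

-- plateau state: j elements already lowered to v-1, b still at v, then the untouched rest
def plat (j b : Nat) (v : Int) (rest : List Int) : List Int :=
  List.replicate j (v - 1) ++ (List.replicate b v ++ rest)

theorem max?_plat (j b : Nat) (v : Int) (rest : List Int) (hb : 1 ≤ b)
    (hrest : ∀ x ∈ rest, x ≤ v) :
    PySem.List.max? (plat j b v rest) (fun x => x) = some v := by
  cases h : PySem.List.max? (plat j b v rest) (fun x => x) with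
  | none =>
    have : plat j b v rest = [] := (PySem.List.max?_eq_none_iff _ _).mp h
    have : v ∈ plat j b v rest := by
      simp [plat, List.mem_replicate]; omega
    simp_all
  | some m =>
    have hvmem : v ∈ plat j b v rest := by
      simp [plat, List.mem_replicate]; omega
    have h1 : v ≤ m := PySem.List.max?_isMax h v hvmem
    have hm : m ∈ plat j b v rest := PySem.List.max?_mem h
    have h2 : m ≤ v := by
      simp only [plat, List.mem_append, List.mem_replicate] at hm
      rcases hm with ⟨_, rfl⟩ | ⟨_, rfl⟩ | hm
      · omega
      · rfl
      · exact hrest m hm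
    have : m = v := le_antisymm h2 h1
    rw [this]

theorem plat_decomp (j b : Nat) (v : Int) (rest : List Int) (hb : 1 ≤ b) :
    plat j b v rest = List.replicate j (v - 1) ++ v :: (List.replicate (b - 1) v ++ rest) := by
  unfold plat
  rw [show b = (b - 1) + 1 by omega, List.replicate_succ, List.cons_append,
    Nat.add_sub_cancel]

theorem index?_plat (j b : Nat) (v : Int) (rest : List Int) (hb : 1 ≤ b) :
    PySem.List.index? (plat j b v rest) v = some j := by
  rw [PySem.List.index?_eq_some_iff]
  refine ⟨List.replicate j (v - 1), List.replicate (b - 1) v ++ rest,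
    plat_decomp j b v rest hb, by simp, ?_⟩
  intro hv
  rw [List.mem_replicate] at hv
  omega

theorem set_mid (pre suf : List Int) (x y : Int) :
    (pre ++ x :: suf).set pre.length y = pre ++ y :: suf := by simp

theorem set_plat (j b : Nat) (v : Int) (rest : List Int) (hb : 1 ≤ b) :
    (plat j b v rest).set j (v - 1) = plat (j + 1) (b - 1) v rest := by
  have h2 : plat (j + 1) (b - 1) v rest
      = List.replicate j (v - 1) ++ (v - 1) :: (List.replicate (b - 1) v ++ rest) := by
    unfold plat
    rw [List.replicate_succ', List.append_assoc, List.singleton_append]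
  rw [plat_decomp j b v rest hb, h2]
  have h3 := set_mid (List.replicate j (v - 1)) (List.replicate (b - 1) v ++ rest) v (v - 1)
  rwa [List.length_replicate] at h3

-- one pick from a plateau
theorem loopA_plat_step (j b : Nat) (v : Int) (rest : List Int) (p : Int) (n : Nat)
    (hb : 1 ≤ b) (hrest : ∀ x ∈ rest, x ≤ v) :
    solveLoopA (plat j b v rest) p (n + 1) =
      solveLoopA (plat (j + 1) (b - 1) v rest) (p + v) n := by
  simp only [solveLoopA, max?_plat j b v rest hb hrest, index?_plat j b v rest hb,
    set_plat j b v rest hb]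

-- s consecutive picks within one level
theorem loopA_round (s : Nat) : ∀ (j b : Nat) (v : Int) (rest : List Int) (p : Int) (n : Nat),
    (∀ x ∈ rest, x ≤ v) →
    solveLoopA (plat j (s + b) v rest) p (s + n) =
      solveLoopA (plat (j + s) b v rest) (p + s * v) n := by
  induction s with
  | zero => intro j b v rest p n _; simp
  | succ s ih =>
    intro j b v rest p n hrest
    have h1 : s + 1 + b = (s + b) + 1 := by omega
    have h2 : s + 1 + n = (s + n) + 1 := by omega
    rw [h1, h2, loopA_plat_step j ((s+b)+1) v rest p (s+n) (by omega) hrest]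
    rw [show (s + b + 1 - 1) = s + b by omega, ih (j+1) b v rest (p + v) n hrest]
    rw [show j + 1 + s = j + (s + 1) by omega]
    congr 1
    push_cast; ring

-- the per-level partial sums
def drainSum (v : Int) (d : Nat) : Int := ∑ i ∈ Finset.range d, (v - (i : Int))

theorem twice_drainSum (v : Int) (d : Nat) : 2 * drainSum v d = (d : Int) * (2 * v - d + 1) := by
  induction d with
  | zero => simp [drainSum]
  | succ d ih =>
    unfold drainSum at *
    rw [Finset.sum_range_succ, mul_add, ih]
    push_cast; ring

theorem drainSum_succ (v : Int) (d : Nat) : drainSum v (d + 1) = v + drainSum (v - 1) d := by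
  unfold drainSum
  rw [Finset.sum_range_succ']
  push_cast; ring_nf

-- d full levels drained: k·d picks, k elements go from v down to v-d
theorem loopA_drain (d : Nat) : ∀ (k : Nat) (v : Int) (rest : List Int) (p : Int) (n : Nat),
    1 ≤ k → (∀ x ∈ rest, x ≤ v - d) →
    solveLoopA (plat 0 k v rest) p (d * k + n) =
      solveLoopA (plat 0 k (v - d) rest) (p + k * drainSum v d) n := by
  induction d with
  | zero => intro k v rest p n _ _; simp [drainSum]
  | succ d ih =>
    intro k v rest p n hk hrest
    have hrest' : ∀ x ∈ rest, x ≤ v := by intro x hx; have := hrest x hx; push_cast at this ⊢; omega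
    have h1 : (d + 1) * k + n = k + (d * k + n) := by ring
    have hround := loopA_round k 0 0 v rest p (d * k + n) hrest'
    rw [Nat.add_zero, Nat.zero_add] at hround
    rw [h1, hround]
    have hplat : plat k 0 v rest = plat 0 k (v - 1) rest := by
      simp [plat]
    rw [hplat, ih k (v - 1) rest (p + k * v) n hk
      (by intro x hx; have := hrest x hx; push_cast at this ⊢; omega)]
    rw [show v - 1 - (d:Int) = v - ((d+1:Nat):Int) by push_cast [Nat.cast_add]; ring]
    congr 1
    rw [drainSum_succ]; ring

-- closed form for A's loop on a plateau, when rest never becomes the maximum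
theorem loopA_closed (k q r : Nat) (v : Int) (rest : List Int)
    (hk : 1 ≤ k) (hr : r < k) (hrest : ∀ x ∈ rest, x ≤ v - q) :
    solveLoopA (plat 0 k v rest) 0 (q * k + r) =
      k * drainSum v q + r * (v - q) := by
  have hd := loopA_drain q k v rest 0 (r + 0) hk hrest
  rw [Nat.add_zero] at hd
  rw [hd]
  have hround := loopA_round r 0 (k - r) (v - (q:Int)) rest (0 + (k:Int) * drainSum v q) 0
    (by intro x hx; exact hrest x hx)
  rw [show r + (k - r) = k by omega, Nat.add_zero, Nat.zero_add] at hround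
  rw [hround]
  simp [solveLoopA]

-- B's division gadgets
theorem floordiv_two_even (x : Int) : PySem.Int.floordiv (2 * x) 2 = x := by
  rw [PySem.Int.floordiv_eq_ediv_of_pos (by omega)]
  omega

theorem floordiv_toNat (B k : Int) (hB : 0 ≤ B) (hk : 0 < k) :
    PySem.Int.floordiv B k = ((B.toNat / k.toNat : Nat) : Int) := by
  rw [show B = ((B.toNat : Nat) : Int) by omega, show k = ((k.toNat : Nat) : Int) by omega]
  rw [PySem.Int.floordiv_natCast]
  simp

theorem mod_toNat (B k : Int) (hB : 0 ≤ B) (hk : 0 < k) :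
    PySem.Int.mod B k = ((B.toNat % k.toNat : Nat) : Int) := by
  rw [show B = ((B.toNat : Nat) : Int) by omega, show k = ((k.toNat : Nat) : Int) by omega]
  rw [PySem.Int.mod_natCast]
  simp

-- the finish step of B computes A's closed form
theorem altFinish_eq (k : Nat) (v B profit : Int) (hk : 1 ≤ k) (hB : 1 ≤ B)
    (rest : List Int) (hrest : ∀ x ∈ rest, x ≤ v - (B.toNat / k : Nat)) :
    altFinish k v B profit = profit + solveLoopA (plat 0 k v rest) 0 B.toNat := by
  have hkpos : (0:Int) < (k:Int) := by exact_mod_cast hk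
  have hq : PySem.Int.floordiv B (k:Int) = ((B.toNat / k : Nat) : Int) := by
    rw [floordiv_toNat B k (by omega) hkpos]; simp
  have hr : PySem.Int.mod B (k:Int) = ((B.toNat % k : Nat) : Int) := by
    rw [mod_toNat B k (by omega) hkpos]; simp
  have hrlt : B.toNat % k < k := Nat.mod_lt _ (by omega)
  have hsplit : B.toNat = B.toNat / k * k + B.toNat % k := by
    rw [Nat.mul_comm]; exact (Nat.div_add_mod B.toNat k).symm
  rw [hsplit, loopA_closed k (B.toNat / k) (B.toNat % k) v rest hk hrlt hrest]
  simp only [altFinish]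
  rw [hq, hr]
  have he : (k:Int) * (v + (v - ((B.toNat / k : Nat):Int) + 1)) * ((B.toNat / k : Nat):Int)
      = 2 * ((k:Int) * drainSum v (B.toNat / k)) := by
    rw [show (2:Int) * ((k:Int) * drainSum v (B.toNat / k))
        = (k:Int) * (2 * drainSum v (B.toNat / k)) by ring, twice_drainSum]
    ring
  rw [he, floordiv_two_even]
  ring

theorem altLoop_eq : ∀ (rest : List Int) (k : Nat) (v B profit : Int),
    1 ≤ k → 1 ≤ B → (∀ x ∈ rest, x ≤ v) → rest.Pairwise (fun a b => b ≤ a) →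
    altLoop rest (k : Int) v B profit = profit + solveLoopA (plat 0 k v rest) 0 B.toNat := by
  intro rest
  induction rest with
  | nil =>
    intro k v B profit hk hB _ _
    simp only [altLoop]
    exact altFinish_eq k v B profit hk hB [] (by simp)
  | cons nv t ih =>
    intro k v B profit hk hB hle hpw
    have hkpos : (0:Int) < (k:Int) := by exact_mod_cast hk
    have hnv : nv ≤ v := hle nv (by simp)
    have htle : ∀ x ∈ t, x ≤ nv := (List.pairwise_cons.mp hpw).1
    set d : Nat := (v - nv).toNat with hdd
    have hd : (d : Int) = v - nv := by omega
    simp only [altLoop]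
    split_ifs with hif
    · -- B ≤ (v - nv) * k: the break; everything is picked above level nv
      have hBn : B.toNat ≤ d * k := by
        have h1 : (B.toNat : Int) ≤ ((d * k : Nat) : Int) := by push_cast [hd]; omega
        exact_mod_cast h1
      have hq : B.toNat / k ≤ d := by
        have := Nat.div_le_div_right (c := k) hBn
        rwa [Nat.mul_div_cancel d (by omega)] at this
      refine altFinish_eq k v B profit hk hB (nv :: t) ?_
      intro x hx
      have hxnv : x ≤ nv := by
        rcases List.mem_cons.mp hx with rfl | hx'
        · exact le_refl x
        · exact htle x hx'
      have : ((B.toNat / k : Nat) : Int) ≤ (d : Int) := by exact_mod_cast hq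
      omega
    · -- B > (v - nv) * k: drain the plateau to level nv and merge
      rw [not_le] at hif
      have hB' : 1 ≤ B - (v - nv) * (k:Int) := by omega
      have hsplit : B.toNat = d * k + (B - (v - nv) * (k:Int)).toNat := by
        have h1 : ((d * k : Nat) : Int) = (v - nv) * (k:Int) := by push_cast [hd]; ring
        have h2 : ((B - (v - nv) * (k:Int)).toNat : Int) = B - (v - nv) * (k:Int) := by omega
        have h3 : (B.toNat : Int) = B := by omega
        have : (B.toNat : Int) = ((d * k + (B - (v - nv) * (k:Int)).toNat : Nat) : Int) := by
          push_cast
          rw [show ((d:Int) * (k:Int)) = (v - nv) * (k:Int) by rw [← hd]] at *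
          omega
        exact_mod_cast this
      have hrest' : ∀ x ∈ nv :: t, x ≤ v - (d : Int) := by
        intro x hx
        rcases List.mem_cons.mp hx with rfl | hx'
        · omega
        · have := htle x hx'; omega
      have hdrain := loopA_drain d k v (nv :: t) 0 ((B - (v - nv) * (k:Int)).toNat) hk hrest'
      have hplat : plat 0 k (v - (d:Int)) (nv :: t) = plat 0 (k + 1) nv t := by
        rw [hd, show v - (v - nv) = nv by ring]
        simp only [plat, List.replicate_zero, List.nil_append]
        rw [List.replicate_succ', List.append_assoc, List.singleton_append]
      have hblock : (k:Int) * (v + nv + 1) * (v - nv) = 2 * ((k:Int) * drainSum v d) := by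
        rw [show (2:Int) * ((k:Int) * drainSum v d) = (k:Int) * (2 * drainSum v d) by ring,
          twice_drainSum, hd]
        ring
      have hih := ih (k + 1) nv (B - (v - nv) * (k:Int))
        (profit + PySem.Int.floordiv ((k:Int) * (v + nv + 1) * (v - nv)) 2)
        (by omega) hB' htle (List.pairwise_cons.mp hpw).2
      rw [show (((k + 1 : Nat)) : Int) = (k:Int) + 1 by push_cast; ring] at hih
      rw [hih, hsplit, hdrain, hplat]
      rw [solveLoopA_acc _ _ (0 + (k:Int) * drainSum v d)]
      rw [hblock, floordiv_two_even]
      ring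

theorem solve_spec : Claim_equal_solve := by
  intro arr B _ hpre
  unfold Spec_solve solve solve_alt
  by_cases hB : B ≤ 0
  · rw [if_pos hB, show B.toNat = 0 by omega]
    rfl
  · have hB1 : 1 ≤ B := by omega
    have harr : arr ≠ [] := hpre.resolve_right hB
    rw [if_neg hB]
    cases hs : PySem.List.sorted arr (fun x => x) true with
    | nil => exact absurd ((PySem.List.sorted_eq_nil_iff arr _ true).mp hs) harr
    | cons v rest =>
      have hperm : (v :: rest).Perm arr := hs ▸ PySem.List.sorted_perm arr (fun x => x) true
      have hpw : (v :: rest).Pairwise (fun a b => b ≤ a) := by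
        have := PySem.List.sorted_pairwise_rev (xs := arr) (key := fun x => x)
        rwa [hs] at this
      have hle : ∀ x ∈ rest, x ≤ v := (List.pairwise_cons.mp hpw).1
      have h1 := altLoop_eq rest 1 v B 0 (le_refl 1) hB1 hle (List.pairwise_cons.mp hpw).2
      simp only []
      rw [Nat.cast_one] at h1
      rw [h1, zero_add]
      have hplat : plat 0 1 v rest = v :: rest := by
        simp [plat]
      rw [hplat]
      exact solveLoopA_perm B.toNat arr (v :: rest) hperm.symm
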